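-- pv_equiv track=rewrite | github.com/Zawiop/AI | ACSL/Cards.py | simulate_pile
-- ===== SOURCE A (Python) =====
-- def match2(cardA, cardB):
--
--     matches = sum(cardA[i] == cardB[i] for i in range(3))
--     return (matches == 2)
--
-- def simulate_pile(face_up, hand):
--
--     final_pile = [face_up]
--     top = face_up
--
--     temp_hand = hand[:]
--
--     while True:
--         found_index = None
--
--         for i, card in enumerate(temp_hand):
--             if match2(top, card):
--                 found_index = i
--                 break
--
--         if found_index is None:
--
--             break
--         else:
--
--             card_to_place = temp_hand.pop(found_index)
--             final_pile.append(card_to_place)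
--             top = card_to_place
--
--     cards_placed = len(final_pile) - 1
--     return final_pile, cards_placed
-- ===== SOURCE B (Python) =====
-- def simulate_pile(face_up, hand):
--     # Bucket cards once by their three "wildcard" keys (one position masked);
--     # each step picks the minimum surviving index over the top's three buckets.
--     n = len(hand)
--     keys = [(c[0], c[1], c[2]) for c in hand]
--     buckets = {}
--     for i, k in enumerate(keys):
--         for p in range(3):
--             wk = (p,) + k[:p] + k[p + 1:]
--             buckets.setdefault(wk, []).append(i)
--     removed = [False] * n
--     pile = [face_up]
--     top = face_up
--     remaining = n
--     while remaining:
--         t = (top[0], top[1], top[2])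
--         best = None
--         for p in range(3):
--             wk = (p,) + t[:p] + t[p + 1:]
--             for i in buckets.get(wk, []):
--                 if removed[i] or keys[i] == t:
--                     continue
--                 if best is None or i < best:
--                     best = i
--                 break
--         if best is None:
--             break
--         removed[best] = True
--         pile.append(hand[best])
--         top = hand[best]
--         remaining -= 1
--     return pile, len(pile) - 1
-- ===== Notes on version B (the rewrite author's own statement) =====
-- stated objective: alternative
-- what changed: B replaces A's repeated linear rescans of the shrinking hand by a dict of per-position wildcard-key buckets (ascending index lists) built once, picking each step's card as the minimum surviving index over the top card's three buckets.
import Mathlib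
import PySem

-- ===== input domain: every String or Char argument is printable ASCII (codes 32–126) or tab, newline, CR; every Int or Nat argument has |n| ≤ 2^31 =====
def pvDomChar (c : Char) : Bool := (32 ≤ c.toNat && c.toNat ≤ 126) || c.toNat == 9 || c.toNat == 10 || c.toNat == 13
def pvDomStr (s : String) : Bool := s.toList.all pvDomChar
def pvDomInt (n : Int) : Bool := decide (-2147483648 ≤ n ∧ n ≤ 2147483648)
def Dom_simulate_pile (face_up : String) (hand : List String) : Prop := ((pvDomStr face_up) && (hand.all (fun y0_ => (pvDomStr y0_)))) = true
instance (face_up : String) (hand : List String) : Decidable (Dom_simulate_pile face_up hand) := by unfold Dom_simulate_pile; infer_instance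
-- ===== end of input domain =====

-- B replaces A's repeated linear rescans of the remaining hand by dict buckets of card
-- indices keyed per masked position, picking the minimum surviving candidate each step
-- (objective: alternative algorithm/data structure; exact same greedy result).


-- ===== PORT A =====
-- match2: sum(cardA[i] == cardB[i] for i in range(3)) == 2.  Indexing is PySem pyGet?;
-- where Python raises IndexError (a string shorter than 3) pyGet? is none — outside Pre_.
def pvMatch2 (cardA cardB : String) : Bool :=
  (((PySem.List.pyRange 0 3 1).map (fun i =>
      if PySem.Str.pyGet? cardA i = PySem.Str.pyGet? cardB i then (1 : Int) else 0)).sum) == 2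

-- the 'for i, card in enumerate(temp_hand): if match2: found_index = i; break' search
def pvFindA (top : String) (temp : List String) : Option Nat :=
  temp.findIdx? (fun card => pvMatch2 top card)

-- termination fact for the while loop: temp_hand.pop(found_index) shortens the list
theorem pvPop_length {α : Type} {xs ys : List α} {j : Int} {x : α}
    (h : PySem.List.pop? xs j = some (x, ys)) : ys.length < xs.length := by
  unfold PySem.List.pop? at h
  cases hk : PySem.List.pyIdx? xs.length j with
  | none => simp [hk] at h
  | some k =>
    simp [hk] at h
    cases hg : xs[k]? with
    | none => simp [hg] at h
    | some y =>
      simp [hg] at h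
      have hkl : k < xs.length := by
        have := List.getElem?_eq_some_iff.mp hg
        exact this.1
      have : ys = xs.eraseIdx k := h.2.symm
      subst this
      rw [List.length_eraseIdx_of_lt hkl]
      omega

-- the while-loop of simulate_pile
def pvLoopA (top : String) (temp : List String) (pile : List String) : List String :=
  match pvFindA top temp with
  | none => pile
  | some j =>
    match h : PySem.List.pop? temp (j : Int) with
    | none => pile  -- unreachable: j is a valid index produced by the scan
    | some (card, rest) => pvLoopA card rest (pile ++ [card])
termination_by temp.length
decreasing_by exact pvPop_length h

def simulate_pile (face_up : String) (hand : List String) : List String × Int :=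
  let pile := pvLoopA face_up hand [face_up]
  (pile, (pile.length : Int) - 1)

-- ===== PORT B =====
-- (c[0], c[1], c[2]); the getD default is never read on Pre_ (all cards have length ≥ 3)
def pvKey3 (c : String) : Char × Char × Char :=
  (c.toList.getD 0 default, c.toList.getD 1 default, c.toList.getD 2 default)

-- wk = (p,) + k[:p] + k[p+1:]
def pvWk (p : Nat) (k : Char × Char × Char) : Nat × Char × Char :=
  if p = 0 then (0, k.2.1, k.2.2) else if p = 1 then (1, k.1, k.2.2) else (2, k.1, k.2.1)

-- buckets.setdefault(wk, []).append(i) over enumerate(keys) × range(3)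
def pvBuckets (keys : List (Char × Char × Char)) : PySem.Dict (Nat × Char × Char) (List Nat) :=
  keys.zipIdx.foldl (fun d ki =>
    (List.range 3).foldl (fun d p => d.modify (pvWk p ki.1) [] (fun l => l ++ [ki.2])) d)
    PySem.Dict.empty

-- the 'for p in range(3): for i in buckets.get(wk, []): …' selection of the step's card
def pvBest (keys : List (Char × Char × Char)) (buckets : PySem.Dict (Nat × Char × Char) (List Nat))
    (removed : List Bool) (t : Char × Char × Char) : Option Nat :=
  (List.range 3).foldl (fun best p =>
    match (buckets.getD (pvWk p t) []).find?
        (fun i => !(removed.getD i false) && !(keys.getD i default == t)) with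
    | none => best
    | some i =>
      match best with
      | none => some i
      | some b => if i < b then some i else some b) none

-- the while-loop; fuel = remaining (decremented exactly once per placed card)
def pvLoopB (hand : List String) (keys : List (Char × Char × Char))
    (buckets : PySem.Dict (Nat × Char × Char) (List Nat))
    (removed : List Bool) (pile : List String) (top : String) : Nat → List String
  | 0 => pile
  | Nat.succ r =>
    match pvBest keys buckets removed (pvKey3 top) with
    | none => pile
    | some b =>
      pvLoopB hand keys buckets (removed.set b true)
        (pile ++ [hand.getD b default]) (hand.getD b default) r

def simulate_pile_alt (face_up : String) (hand : List String) : List String × Int :=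
  let keys := hand.map pvKey3
  let buckets := pvBuckets keys
  let pile := pvLoopB hand keys buckets (List.replicate hand.length false) [face_up]
      face_up hand.length
  (pile, (pile.length : Int) - 1)

-- ===== PRECONDITION & SPEC =====
-- Pre_ excludes exactly the inputs on which Python A raises IndexError: a non-empty hand
-- together with any card (face-up or in hand) shorter than 3 characters.
def Pre_simulate_pile (face_up : String) (hand : List String) : Prop :=
  hand = [] ∨ (3 ≤ PySem.Str.len face_up ∧ ∀ c ∈ hand, 3 ≤ PySem.Str.len c)
instance (face_up : String) (hand : List String) : Decidable (Pre_simulate_pile face_up hand) := by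
  unfold Pre_simulate_pile; infer_instance

def pvWitness_simulate_pile : String × List String := ("abc", ["abd", "xbd", "zzz"])

def Spec_simulate_pile (face_up : String) (hand : List String) (out : List String × Int) : Prop :=
  out = simulate_pile_alt face_up hand
instance (face_up : String) (hand : List String) (out : List String × Int) :
    Decidable (Spec_simulate_pile face_up hand out) := by unfold Spec_simulate_pile; infer_instance

-- ===== CLAIM (what is proved, stated in full; the proofs are below) =====
def Claim_equal_simulate_pile : Prop := ∀ (face_up : String) (hand : List String),
  Dom_simulate_pile face_up hand → Pre_simulate_pile face_up hand →
  Spec_simulate_pile face_up hand (simulate_pile face_up hand)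

-- ===== LEMMAS AND PROOFS =====
def pvAlive (removed : List Bool) (i : Nat) : Bool := !(removed.getD i false)
def pvAliveIdx (removed : List Bool) (n : Nat) : List Nat := (List.range n).filter (pvAlive removed)
def pvSeq (removed : List Bool) (hand : List String) : List String :=
  (pvAliveIdx removed hand.length).map (fun i => hand.getD i default)

def pvOptMin : Option Nat → Option Nat → Option Nat
  | none, b => b
  | some x, none => some x
  | some x, some y => some (min x y)
set_option maxRecDepth 4000 in
theorem pv_match_iff (a b : String) (ha : 3 ≤ a.toList.length) (hb : 3 ≤ b.toList.length) :
    pvMatch2 a b = ((pvWk 0 (pvKey3 b) == pvWk 0 (pvKey3 a) ||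
                     pvWk 1 (pvKey3 b) == pvWk 1 (pvKey3 a) ||
                     pvWk 2 (pvKey3 b) == pvWk 2 (pvKey3 a)) &&
                    !(pvKey3 b == pvKey3 a)) := by
  have hR : PySem.List.pyRange 0 3 1 = [0, 1, 2] := by decide
  rcases ha' : a.toList with _ | ⟨a0, _ | ⟨a1, _ | ⟨a2, ar⟩⟩⟩ <;>
    rw [ha'] at ha <;> simp at ha
  rcases hb' : b.toList with _ | ⟨b0, _ | ⟨b1, _ | ⟨b2, br⟩⟩⟩ <;>
    rw [hb'] at hb <;> simp at hb
  simp only [pvMatch2, hR, pvKey3, pvWk, List.map_cons, List.map_nil]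
  simp only [ha', hb']
  simp only [PySem.Str.pyGet?_eq, PySem.Chars.pyGet?_eq_listPyGet?, ha', hb']
  simp [PySem.List.pyGet?_ofNat', PySem.List.pyGet?_zero_cons, Prod.ext_iff]
  by_cases h0 : a0 = b0 <;> by_cases h1 : a1 = b1 <;> by_cases h2 : a2 = b2 <;>
    simp [h0, h1, h2] <;> tauto
theorem pv_find?_getElem? {α : Type} (l : List α) (p : α → Bool) (j : Nat)
    (h : List.findIdx? p l = some j) : l.find? p = l[j]? := by
  induction l generalizing j with
  | nil => simp at h
  | cons a tl ih =>
    rw [List.findIdx?_cons] at h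
    by_cases hp : p a
    · simp [hp] at h
      subst h
      simp [List.find?_cons, hp]
    · simp [hp] at h
      cases hf : List.findIdx? p tl with
      | none => rw [hf] at h; simp at h
      | some k =>
        rw [hf] at h
        simp at h
        subst h
        simp [List.find?_cons, hp, ih k hf]

theorem pv_flatMap_if (l : List Nat) (f : Nat → Bool) :
    (l.flatMap (fun i => if f i then [i] else [])) = l.filter f := by
  induction l with
  | nil => simp
  | cons a tl ih => by_cases h : f a <;> simp [h, ih]

theorem pv_zipIdx_eq {K : Type} [Inhabited K] (l : List K) :
    l.zipIdx = (List.range l.length).map (fun i => (l.getD i default, i)) := by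
  apply List.ext_getElem
  · simp
  · intro i h1 h2
    simp only [List.getElem_zipIdx, List.getElem_map, List.getElem_range]
    rw [List.getD_eq_getElem _ _ (by simpa using h1)]
    simp

theorem pv_find?_or (l : List Nat) (hl : l.Pairwise (· < ·)) (A B : Nat → Bool) :
    l.find? (fun i => A i || B i) = pvOptMin (l.find? A) (l.find? B) := by
  induction l with
  | nil => simp [pvOptMin]
  | cons a tl ih =>
    have hl' := List.pairwise_cons.mp hl
    cases hA : A a <;> cases hB : B a
    · simp only [List.find?_cons, hA, hB]
      simpa using ih hl'.2
    · simp only [List.find?_cons, hA, hB]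
      cases hfa : tl.find? A with
      | none => simp [pvOptMin]
      | some x =>
        have hx : a < x := hl'.1 x (List.mem_of_find?_eq_some hfa)
        simp only [pvOptMin]
        have : min x a = a := by omega
        simp [this]
    · simp only [List.find?_cons, hA, hB]
      cases hfb : tl.find? B with
      | none => simp [pvOptMin]
      | some y =>
        have hy : a < y := hl'.1 y (List.mem_of_find?_eq_some hfb)
        simp only [pvOptMin]
        have : min a y = a := by omega
        simp [this]
    · simp [List.find?_cons, hA, hB, pvOptMin]

theorem pv_find?_congr {α : Type} (l : List α) (p q : α → Bool)
    (h : ∀ x ∈ l, p x = q x) : l.find? p = l.find? q := by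
  induction l with
  | nil => simp
  | cons a tl ih =>
    have ha := h a (by simp)
    simp only [List.find?_cons, ← ha]
    cases hp : p a
    · exact ih (fun x hx => h x (by simp [hx]))
    · rfl

theorem pv_find?_filter (l : List Nat) (p q : Nat → Bool) :
    (l.filter p).find? q = l.find? (fun i => p i && q i) := by
  rw [List.find?_filter]
  apply pv_find?_congr
  intro x _
  cases hp : p x <;> cases hq : q x <;> simp [hp, hq]

theorem pv_bucket_spec (keys : List (Char × Char × Char)) (p : Nat) (hp : p < 3)
    (t : Char × Char × Char) :
    (pvBuckets keys).getD (pvWk p t) [] =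
      (List.range keys.length).filter (fun i => pvWk p (keys.getD i default) == pvWk p t) := by
  have hfold : pvBuckets keys =
      (keys.zipIdx.flatMap (fun ki => (List.range 3).map (fun q => (pvWk q ki.1, ki.2)))).foldl
        (fun d pr => d.modify pr.1 [] (fun l => l ++ [pr.2])) PySem.Dict.empty := by
    unfold pvBuckets
    rw [List.foldl_flatMap]
    simp only [List.foldl_map]
  rw [hfold, PySem.Dict.getD_foldl_modify_append, PySem.Dict.getD_empty, List.nil_append]
  rw [pv_zipIdx_eq, List.flatMap_map, List.filter_flatMap, List.map_flatMap]
  rw [show List.range 3 = [0, 1, 2] by decide]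
  have hblock : ∀ i : Nat,
      (List.filter (fun pr => pr.1 == pvWk p t)
        (List.map (fun q => (pvWk q (keys.getD i default), i)) [0, 1, 2])).map (fun x => x.2) =
      (if pvWk p (keys.getD i default) == pvWk p t then [i] else []) := by
    intro i
    interval_cases p <;>
      · simp only [List.map_cons, List.map_nil, List.filter_cons, List.filter_nil]
        simp only [pvWk, beq_iff_eq, Prod.ext_iff]
        simp
        split_ifs <;> simp_all
  simp only [hblock]
  exact pv_flatMap_if _ _

theorem pv_getD_map_key (hand : List String) (i : Nat) (hi : i < hand.length) :
    (hand.map pvKey3).getD i default = pvKey3 (hand.getD i default) := by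
  rw [List.getD_eq_getElem (hand.map pvKey3) default (by simpa using hi),
      List.getD_eq_getElem hand default hi, List.getElem_map]

theorem pv_best_as_optmin (keys : List (Char × Char × Char))
    (buckets : PySem.Dict (Nat × Char × Char) (List Nat)) (removed : List Bool)
    (t : Char × Char × Char) :
    pvBest keys buckets removed t =
      pvOptMin (pvOptMin
        ((buckets.getD (pvWk 0 t) []).find? (fun i => !(removed.getD i false) && !(keys.getD i default == t)))
        ((buckets.getD (pvWk 1 t) []).find? (fun i => !(removed.getD i false) && !(keys.getD i default == t))))
        ((buckets.getD (pvWk 2 t) []).find? (fun i => !(removed.getD i false) && !(keys.getD i default == t))) := by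
  unfold pvBest
  rw [show List.range 3 = [0, 1, 2] by decide]
  simp only [List.foldl_cons, List.foldl_nil]
  generalize ((buckets.getD (pvWk 0 t) []).find? (fun i => !(removed.getD i false) && !(keys.getD i default == t))) = o0
  generalize ((buckets.getD (pvWk 1 t) []).find? (fun i => !(removed.getD i false) && !(keys.getD i default == t))) = o1
  generalize ((buckets.getD (pvWk 2 t) []).find? (fun i => !(removed.getD i false) && !(keys.getD i default == t))) = o2
  rcases o0 with _ | i0 <;> rcases o1 with _ | i1 <;> rcases o2 with _ | i2 <;>
    simp [pvOptMin, min_def] <;> split_ifs <;> simp <;> omega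

theorem pv_best_eq (hand : List String) (removed : List Bool) (top : String)
    (htop : 3 ≤ top.toList.length) (hhand : ∀ c ∈ hand, 3 ≤ c.toList.length) :
    pvBest (hand.map pvKey3) (pvBuckets (hand.map pvKey3)) removed (pvKey3 top) =
      (List.range hand.length).find?
        (fun i => pvAlive removed i && pvMatch2 top (hand.getD i default)) := by
  rw [pv_best_as_optmin]
  rw [pv_bucket_spec _ 0 (by omega), pv_bucket_spec _ 1 (by omega), pv_bucket_spec _ 2 (by omega)]
  simp only [List.length_map]
  rw [pv_find?_filter, pv_find?_filter, pv_find?_filter]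
  rw [← pv_find?_or _ List.pairwise_lt_range]
  rw [← pv_find?_or _ List.pairwise_lt_range]
  apply pv_find?_congr
  intro i hi
  have hi' : i < hand.length := List.mem_range.mp hi
  have hmem : hand.getD i default ∈ hand := by
    rw [List.getD_eq_getElem hand default hi']; exact List.getElem_mem hi'
  rw [pv_match_iff top (hand.getD i default) htop (hhand _ hmem)]
  rw [pv_getD_map_key hand i hi']
  unfold pvAlive
  generalize (pvWk 0 (pvKey3 (hand.getD i default)) == pvWk 0 (pvKey3 top)) = x0
  generalize (pvWk 1 (pvKey3 (hand.getD i default)) == pvWk 1 (pvKey3 top)) = x1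
  generalize (pvWk 2 (pvKey3 (hand.getD i default)) == pvWk 2 (pvKey3 top)) = x2
  generalize (removed.getD i false) = al
  generalize (pvKey3 (hand.getD i default) == pvKey3 top) = kk
  cases x0 <;> cases x1 <;> cases x2 <;> cases al <;> cases kk <;> rfl

theorem pv_aliveIdx_set (removed : List Bool) (n : Nat) (hr : removed.length = n)
    (i0 : Nat) (hi0 : i0 < n) :
    pvAliveIdx (removed.set i0 true) n = (pvAliveIdx removed n).filter (fun x => x != i0) := by
  unfold pvAliveIdx
  rw [List.filter_filter]
  apply List.filter_congr
  intro x hx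
  have hxn : x < n := List.mem_range.mp hx
  unfold pvAlive
  rw [List.getD_eq_getElem _ _ (by simp [hr]; omega), List.getElem_set,
      List.getD_eq_getElem _ _ (by omega : x < removed.length)]
  by_cases hxi : x = i0
  · subst hxi; simp
  · rw [if_neg (by omega)]
    simp [hxi]

theorem pv_stepA (hand : List String) (removed : List Bool) (top : String) (pile : List String)
    (hr : removed.length = hand.length) :
    pvLoopA top (pvSeq removed hand) pile =
      match (List.range hand.length).find?
          (fun i => pvAlive removed i && pvMatch2 top (hand.getD i default)) with
      | none => pile
      | some i =>
        pvLoopA (hand.getD i default) (pvSeq ((removed.set i true)) hand)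
          (pile ++ [hand.getD i default]) := by
  have hnd : (pvAliveIdx removed hand.length).Nodup := List.Nodup.filter _ List.nodup_range
  have hPfind : (List.range hand.length).find?
      (fun i => pvAlive removed i && pvMatch2 top (hand.getD i default)) =
      (pvAliveIdx removed hand.length).find? (fun i => pvMatch2 top (hand.getD i default)) := by
    unfold pvAliveIdx
    rw [pv_find?_filter]
  rw [hPfind]
  rw [pvLoopA.eq_def]
  have hfa : pvFindA top (pvSeq removed hand) =
      List.findIdx? (fun i => pvMatch2 top (hand.getD i default)) (pvAliveIdx removed hand.length) := by
    unfold pvFindA pvSeq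
    rw [List.findIdx?_map]
    rfl
  cases hf : List.findIdx? (fun i => pvMatch2 top (hand.getD i default)) (pvAliveIdx removed hand.length) with
  | none =>
    have hfn : (pvAliveIdx removed hand.length).find? (fun i => pvMatch2 top (hand.getD i default)) = none :=
      List.find?_eq_none.mpr (by
        intro x hx
        simpa using List.findIdx?_eq_none_iff.mp hf x hx)
    rw [hfa, hf, hfn]
  | some j =>
    have hjl : j < (pvAliveIdx removed hand.length).length :=
      (List.findIdx?_eq_some_iff_findIdx_eq.mp hf).1
    have hfind : (pvAliveIdx removed hand.length).find? (fun i => pvMatch2 top (hand.getD i default)) =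
        some (pvAliveIdx removed hand.length)[j] := by
      rw [pv_find?_getElem? _ _ _ hf]
      simp [List.getElem?_eq_getElem hjl]
    have hij : (pvAliveIdx removed hand.length)[j] < hand.length ∧
        pvAlive removed (pvAliveIdx removed hand.length)[j] := by
      have hmem : (pvAliveIdx removed hand.length)[j] ∈ pvAliveIdx removed hand.length :=
        List.getElem_mem hjl
      have hmf := List.mem_filter.mp hmem
      exact ⟨List.mem_range.mp hmf.1, hmf.2⟩
    have hpop : PySem.List.pop?
        ((pvAliveIdx removed hand.length).map (fun i => hand.getD i default)) (j : Int) =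
        some (hand.getD (pvAliveIdx removed hand.length)[j] default,
          ((pvAliveIdx removed hand.length).eraseIdx j).map (fun i => hand.getD i default)) := by
      unfold PySem.List.pop? PySem.List.pyIdx?
      rw [if_pos (by exact_mod_cast Nat.zero_le j),
          if_pos (by simp only [List.length_map]; exact_mod_cast hjl)]
      simp [List.getElem?_map, List.getElem?_eq_getElem hjl, List.eraseIdx_map]
    have hset : pvSeq (removed.set (pvAliveIdx removed hand.length)[j] true) hand =
        ((pvAliveIdx removed hand.length).eraseIdx j).map (fun i => hand.getD i default) := by
      unfold pvSeq
      rw [pv_aliveIdx_set removed hand.length hr _ hij.1]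
      congr 1
      rw [← List.Nodup.erase_eq_filter hnd]
      exact List.Nodup.erase_getElem hnd j hjl
    have hseq : pvSeq removed hand =
        (pvAliveIdx removed hand.length).map (fun i => hand.getD i default) := rfl
    simp only [hfa, hf, hfind]
    split
    · next heq => rw [hseq, hpop] at heq; cases heq
    · next card rest heq =>
        rw [hseq, hpop] at heq
        injection heq with heq'
        injection heq' with h1 h2
        subst h1
        subst h2
        rw [hset]

theorem pv_loop_eq (hand : List String) (hhand : ∀ c ∈ hand, 3 ≤ c.toList.length) :
    ∀ (r : Nat) (removed : List Bool) (top : String) (pile : List String),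
    removed.length = hand.length →
    (pvAliveIdx removed hand.length).length = r →
    3 ≤ top.toList.length →
    pvLoopA top (pvSeq removed hand) pile =
      pvLoopB hand (hand.map pvKey3) (pvBuckets (hand.map pvKey3)) removed pile top r := by
  intro r
  induction r with
  | zero =>
    intro removed top pile hr hlen _
    have hempty : pvAliveIdx removed hand.length = [] := List.length_eq_zero_iff.mp hlen
    rw [pvLoopA.eq_def]
    simp [pvFindA, pvSeq, hempty, pvLoopB]
  | succ r ih =>
    intro removed top pile hr hlen htop
    rw [pv_stepA hand removed top pile hr]
    have hb := pv_best_eq hand removed top htop hhand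
    have hnd : (pvAliveIdx removed hand.length).Nodup := List.Nodup.filter _ List.nodup_range
    cases hsel : (List.range hand.length).find?
        (fun i => pvAlive removed i && pvMatch2 top (hand.getD i default)) with
    | none =>
      simp only [pvLoopB, hb, hsel]
    | some i =>
      have hin : i < hand.length := List.mem_range.mp (List.mem_of_find?_eq_some hsel)
      have halive : pvAlive removed i = true := by
        have h := List.find?_some hsel
        simp at h
        exact h.1
      have hmemA : i ∈ pvAliveIdx removed hand.length :=
        List.mem_filter.mpr ⟨List.mem_range.mpr hin, halive⟩
      have hmem : hand.getD i default ∈ hand := by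
        rw [List.getD_eq_getElem hand default hin]; exact List.getElem_mem hin
      simp only [pvLoopB, hb, hsel]
      apply ih
      · simp [hr]
      · rw [pv_aliveIdx_set removed hand.length hr i hin,
            ← List.Nodup.erase_eq_filter hnd,
            List.length_erase_of_mem hmemA, hlen]
        omega
      · exact hhand _ hmem

theorem pv_init_seq (hand : List String) :
    pvSeq (List.replicate hand.length false) hand = hand := by
  unfold pvSeq
  have hfil : pvAliveIdx (List.replicate hand.length false) hand.length = List.range hand.length := by
    unfold pvAliveIdx
    apply List.filter_eq_self.mpr
    intro a ha
    have : a < hand.length := List.mem_range.mp ha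
    unfold pvAlive
    rw [List.getD_eq_getElem _ _ (by simpa using this)]
    simp
  rw [hfil]
  apply List.ext_getElem
  · simp
  · intro i h1 h2
    simp [List.getElem?_eq_getElem h2]

theorem pv_init_len (hand : List String) :
    (pvAliveIdx (List.replicate hand.length false) hand.length).length = hand.length := by
  unfold pvAliveIdx
  rw [List.filter_eq_self.mpr]
  · simp
  · intro a ha
    have : a < hand.length := List.mem_range.mp ha
    unfold pvAlive
    rw [List.getD_eq_getElem _ _ (by simpa using this)]
    simp

-- ===== VERDICT (by name: the statement is the Claim_ definition above) =====
theorem simulate_pile_spec : Claim_equal_simulate_pile := by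
  unfold Claim_equal_simulate_pile
  intro fu hand _ hpre
  unfold Spec_simulate_pile simulate_pile simulate_pile_alt
  rcases hpre with hnil | ⟨hfu, hhand⟩
  · subst hnil
    rw [pvLoopA.eq_def]
    simp [pvFindA, pvLoopB]
  · have hfu' : 3 ≤ fu.toList.length := by simpa [pysem] using hfu
    have hh3 : ∀ c ∈ hand, 3 ≤ c.toList.length := by
      intro c hc
      simpa [pysem] using hhand c hc
    have hmain : pvLoopA fu hand [fu] =
        pvLoopB hand (hand.map pvKey3) (pvBuckets (hand.map pvKey3))
          (List.replicate hand.length false) [fu] fu hand.length := by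
      conv_lhs => rw [← pv_init_seq hand]
      exact pv_loop_eq hand hh3 hand.length _ fu [fu] (by simp) (pv_init_len hand) hfu'
    simp only [hmain]
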